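-- pv_equiv track=rewrite | github.com/Polarvear/music_maker | src/generator.py | build_markov_chain
-- ===== SOURCE A (Python) =====
-- def build_markov_chain(data, k=1):
--     """ Markov Chain을 구축합니다. 여기서 k는 상태의 크기를 나타냅니다. """
--     chain = {}
--     for i in range(len(data) - k):
--         state = tuple(data[i:i+k])
--         next_state = data[i+k]
--         if state not in chain:
--             chain[state] = {}
--         if next_state not in chain[state]:
--             chain[state][next_state] = 1
--         else:
--             chain[state][next_state] += 1
--     return chain
-- ===== SOURCE B (Python) =====
-- def build_markov_chain(data, k=1):
--     # Group-by formulation: enumerate the (state, next) pairs once, then build each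
--     # state's successor-count dict by filtering and counting, instead of A's
--     # in-place nested-dict updates.
--     pairs = [(tuple(data[i:i+k]), data[i+k]) for i in range(len(data) - k)]
--     chain = {}
--     for state in dict.fromkeys(s for s, _ in pairs):
--         nexts = [n for s, n in pairs if s == state]
--         chain[state] = {n: nexts.count(n) for n in dict.fromkeys(nexts)}
--     return chain
-- ===== Notes on version B (the rewrite author's own statement) =====
-- stated objective: alternative
-- what changed: B replaces A's single-pass in-place nested-dict update with a group-by formulation: it materialises the (state, next) pair list once, dedups the states in first-occurrence order, and builds each state's inner dict by filtering the pair list and counting occurrences.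
import Mathlib
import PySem

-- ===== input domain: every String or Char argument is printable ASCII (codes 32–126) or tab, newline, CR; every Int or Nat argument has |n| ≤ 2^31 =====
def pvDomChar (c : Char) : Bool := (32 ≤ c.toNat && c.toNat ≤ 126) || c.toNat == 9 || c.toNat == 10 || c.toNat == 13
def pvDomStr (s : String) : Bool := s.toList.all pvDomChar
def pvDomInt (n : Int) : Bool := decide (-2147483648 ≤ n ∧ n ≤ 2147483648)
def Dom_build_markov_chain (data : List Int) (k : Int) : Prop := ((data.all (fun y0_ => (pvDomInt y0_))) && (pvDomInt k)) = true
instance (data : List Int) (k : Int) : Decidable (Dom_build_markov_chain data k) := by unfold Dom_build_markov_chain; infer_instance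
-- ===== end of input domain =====

-- B builds the same Markov-chain table by a group-by formulation (materialise the
-- (state, next) pairs, dedup the states, filter-and-count per state) instead of A's
-- single pass of in-place nested-dict updates; objective: alternative decomposition.

-- ===== PORT A =====
def build_markov_chain (data : List Int) (k : Int) : List (List Int × List (Int × Int)) :=
  let chain := (PySem.List.pyRange 0 ((data.length : Int) - k) 1).foldl
    (fun chain i =>
      let state := PySem.List.slice data (some i) (some (i + k))
      let next_state := (PySem.List.pyGet? data (i + k)).getD 0
      let chain := if ¬ chain.contains state then chain.insert state PySem.Dict.empty else chain
      let inner := chain.getD state PySem.Dict.empty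
      let inner := if ¬ inner.contains next_state then inner.insert next_state 1
                   else inner.insert next_state (inner.getD next_state 0 + 1)
      chain.insert state inner)
    PySem.Dict.empty
  chain.items.map (fun p => (p.1, p.2.items))

-- ===== PORT B =====
def build_markov_chain_alt (data : List Int) (k : Int) : List (List Int × List (Int × Int)) :=
  let pairs := (PySem.List.pyRange 0 ((data.length : Int) - k) 1).map
    (fun i => (PySem.List.slice data (some i) (some (i + k)),
               (PySem.List.pyGet? data (i + k)).getD 0))
  (PySem.Set.ofList (pairs.map (·.1))).map (fun state =>
    let nexts := (pairs.filter (fun p => p.1 == state)).map (·.2)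
    (state, (PySem.Set.ofList nexts).map (fun n => (n, (nexts.count n : Int)))))

-- ===== PRECONDITION & SPEC =====
-- Pre_ excludes exactly the inputs where A raises IndexError (data[i+k] with i+k < -len(data), which happens iff k < -len(data)); B raises there too.
def Pre_build_markov_chain (data : List Int) (k : Int) : Prop := -(data.length : Int) ≤ k
instance (data : List Int) (k : Int) : Decidable (Pre_build_markov_chain data k) := by unfold Pre_build_markov_chain; infer_instance
def pvWitness_build_markov_chain : List Int × Int := ([1, 2, 1, 2, 1], 1)

def Spec_build_markov_chain (data : List Int) (k : Int) (out : List (List Int × List (Int × Int))) : Prop := out = build_markov_chain_alt data k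
instance (data : List Int) (k : Int) (out : List (List Int × List (Int × Int))) : Decidable (Spec_build_markov_chain data k out) := by unfold Spec_build_markov_chain; infer_instance

-- ===== CLAIM (what is proved, stated in full; the proofs are below) =====
def Claim_equal_build_markov_chain : Prop := ∀ (data : List Int) (k : Int), Dom_build_markov_chain data k → Pre_build_markov_chain data k → Spec_build_markov_chain data k (build_markov_chain data k)

-- ===== LEMMAS AND PROOFS =====

-- The (state, next) key both programs extract at index i.
def pvPair (data : List Int) (k : Int) (i : Int) : List Int × Int :=
  (PySem.List.slice data (some i) (some (i + k)), (PySem.List.pyGet? data (i + k)).getD 0)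

def pvRng (data : List Int) (k : Int) : List Int :=
  PySem.List.pyRange 0 ((data.length : Int) - k) 1

-- A's loop body, rewritten as a single nested insert ("increment chain[state][next]").
def pvStepA (chain : PySem.Dict (List Int) (PySem.Dict Int Int)) (key : List Int × Int) :
    PySem.Dict (List Int) (PySem.Dict Int Int) :=
  chain.insert key.1 ((chain.getD key.1 PySem.Dict.empty).insert key.2
    ((chain.getD key.1 PySem.Dict.empty).getD key.2 0 + 1))

-- The successor list and the successor-count table B computes for one state.
def pvNexts (ks : List (List Int × Int)) (s : List Int) : List Int :=
  (ks.filter (fun p => p.1 == s)).map (·.2)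

def pvInner (ks : List (List Int × Int)) (s : List Int) : List (Int × Int) :=
  (PySem.Set.ofList (pvNexts ks s)).map (fun n => (n, ((pvNexts ks s).count n : Int)))

theorem pv_stepA_lit (chain : PySem.Dict (List Int) (PySem.Dict Int Int)) (s : List Int) (n : Int) :
    (let chain' := if ¬ chain.contains s then chain.insert s PySem.Dict.empty else chain
     let inner := chain'.getD s PySem.Dict.empty
     let inner' := if ¬ inner.contains n then inner.insert n 1
                   else inner.insert n (inner.getD n 0 + 1)
     chain'.insert s inner') = pvStepA chain (s, n) := by
  by_cases hc : chain.contains s = true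
  · by_cases hn : (chain.getD s PySem.Dict.empty).contains n = true
    · simp [hc, hn, pvStepA]
    · have hn' : (chain.getD s PySem.Dict.empty).contains n = false := by simpa using hn
      simp [hc, hn', pvStepA, PySem.Dict.getD_of_not_contains _ _ hn']
  · have hc' : chain.contains s = false := by simpa using hc
    simp [hc', pvStepA, PySem.Dict.getD_insert_self, PySem.Dict.insert_insert_self,
      PySem.Dict.getD_of_not_contains _ _ hc']

theorem pvNexts_append (ks : List (List Int × Int)) (key : List Int × Int) (s : List Int) :
    pvNexts (ks ++ [key]) s
      = if key.1 = s then pvNexts ks s ++ [key.2] else pvNexts ks s := by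
  by_cases h : key.1 = s <;> simp [pvNexts, List.filter_append, h]

theorem pvNexts_nil_of_not_mem (ks : List (List Int × Int)) (s : List Int)
    (h : s ∉ ks.map (·.1)) : pvNexts ks s = [] := by
  unfold pvNexts
  rw [List.filter_eq_nil_iff.mpr, List.map_nil]
  intro p hp
  simp only [beq_iff_eq]
  exact fun he => h (he ▸ List.mem_map_of_mem hp)

theorem pv_map_fst_pair {A B : Type} (l : List A) (f : A -> B) :
    (l.map (fun x => (x, f x))).map (fun p => p.1) = l := by
  rw [List.map_map]
  exact (List.map_congr_left fun a _ => rfl).trans (List.map_id _)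

theorem pvInner_append_of_ne (ks : List (List Int × Int)) (key : List Int × Int) (s : List Int)
    (h : key.1 ≠ s) : pvInner (ks ++ [key]) s = pvInner ks s := by
  unfold pvInner
  rw [pvNexts_append, if_neg h]

-- MAIN characterisation: A's nested-dict fold IS B's group-by table, entry for entry.
theorem pv_char (ks : List (List Int × Int)) :
    (ks.foldl pvStepA PySem.Dict.empty).items
      = (PySem.Set.ofList (ks.map (·.1))).map
          (fun s => (s, PySem.Dict.mk (pvInner ks s))) := by
  induction ks using List.reverseRecOn with
  | nil => rfl
  | append_singleton ks key ih =>
    obtain ⟨s0, n0⟩ := key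
    set D := ks.foldl pvStepA PySem.Dict.empty with hD
    have hkeys : D.keys = PySem.Set.ofList (ks.map (·.1)) := by
      show D.items.map (fun p => p.1) = _
      rw [ih]
      exact pv_map_fst_pair _ _
    have hnd : D.keys.Nodup := by rw [hkeys]; exact PySem.Set.nodup_ofList _
    rw [List.foldl_append, List.foldl_cons, List.foldl_nil, List.map_append, List.map_cons,
      List.map_nil, PySem.Set.ofList_append_singleton]
    by_cases hs : s0 ∈ ks.map (·.1)
    · -- the state already has an entry: A overwrites it in place
      have hsS : s0 ∈ PySem.Set.ofList (ks.map (·.1)) := (PySem.Set.mem_ofList _ _).mpr hs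
      have hcont : D.contains s0 = true := by
        rw [PySem.Dict.contains_iff_mem_keys, hkeys]; exact hsS
      have hget : D.getD s0 PySem.Dict.empty = PySem.Dict.mk (pvInner ks s0) := by
        refine PySem.Dict.getD_of_mem_items _ ?_ hnd _
        rw [ih]
        exact List.mem_map_of_mem hsS
      rw [PySem.Set.add_of_mem hsS]
      show (D.insert s0 _).items = _
      rw [PySem.Dict.items_insert_of_contains _ _ hcont, ih, List.map_map]
      refine List.map_congr_left (fun s hsmem => ?_)
      by_cases hss : s = s0
      · subst hss
        simp only [Function.comp, beq_self_eq_true, if_pos, Prod.mk.injEq, true_and]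
        rw [hget]
        -- inner-dict update equals the recount over nexts ++ [n0]
        have hN : pvNexts (ks ++ [(s, n0)]) s = pvNexts ks s ++ [n0] := by
          rw [pvNexts_append]; simp
        set N := pvNexts ks s with hNdef
        have hkeysI : (PySem.Dict.mk (pvInner ks s)).keys = PySem.Set.ofList N := by
          show ((pvInner ks s).map (fun p => p.1)) = _
          unfold pvInner
          exact pv_map_fst_pair _ _
        have hinnd : (PySem.Dict.mk (pvInner ks s)).keys.Nodup := by
          rw [hkeysI]; exact PySem.Set.nodup_ofList _
        apply PySem.Dict.ext
        by_cases hn : n0 ∈ N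
        · have hnS : n0 ∈ PySem.Set.ofList N := (PySem.Set.mem_ofList _ _).mpr hn
          have hic : (PySem.Dict.mk (pvInner ks s)).contains n0 = true := by
            rw [PySem.Dict.contains_iff_mem_keys, hkeysI]; exact hnS
          have higet : (PySem.Dict.mk (pvInner ks s)).getD n0 0 = (N.count n0 : Int) := by
            refine PySem.Dict.getD_of_mem_items _ ?_ hinnd _
            exact List.mem_map_of_mem hnS
          rw [PySem.Dict.items_insert_of_contains _ _ hic, higet]
          show (pvInner ks s).map _ = pvInner (ks ++ [(s, n0)]) s
          unfold pvInner
          rw [hN, PySem.Set.ofList_append_singleton, PySem.Set.add_of_mem hnS, List.map_map]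
          refine List.map_congr_left (fun n hnmem => ?_)
          by_cases hnn : n = n0
          · subst hnn
            simp [List.count_append]
          · have hb : (n == n0) = false := by simpa using hnn
            have h2 : ¬ (n0 = n) := fun h => hnn h.symm
            simp [Function.comp, hb, h2, List.count_append, ← hNdef]
        · have hic : (PySem.Dict.mk (pvInner ks s)).contains n0 = false := by
            rw [Bool.eq_false_iff]
            intro hcon
            rw [PySem.Dict.contains_iff_mem_keys, hkeysI] at hcon
            exact hn ((PySem.Set.mem_ofList _ _).mp hcon)
          have higet : (PySem.Dict.mk (pvInner ks s)).getD n0 0 = 0 :=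
            PySem.Dict.getD_of_not_contains _ _ hic
          rw [PySem.Dict.items_insert_of_not_contains _ _ hic, higet]
          show pvInner ks s ++ [(n0, 0 + 1)] = pvInner (ks ++ [(s, n0)]) s
          unfold pvInner
          rw [hN, PySem.Set.ofList_append_singleton, PySem.Set.add_of_not_mem
            (fun hm => hn ((PySem.Set.mem_ofList _ _).mp hm)), List.map_append]
          congr 1
          · refine List.map_congr_left (fun n hnmem => ?_)
            have hne : n ≠ n0 := fun he => hn (he ▸ (PySem.Set.mem_ofList _ _).mp hnmem)
            have h2 : ¬ (n0 = n) := fun h => hne h.symm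
            simp [List.count_append, h2, ← hNdef]
          · simp [List.count_append, List.count_eq_zero.mpr hn]
      · have hbeq : (s == s0) = false := by simpa using hss
        simp only [Function.comp, hbeq, if_neg, Bool.false_eq_true, not_false_iff, Prod.mk.injEq]
        rw [pvInner_append_of_ne _ _ _ (fun he => hss (he.symm))]
        simp
    · -- a fresh state: A appends a new singleton inner dict
      have hsS : s0 ∉ PySem.Set.ofList (ks.map (·.1)) :=
        fun hm => hs ((PySem.Set.mem_ofList _ _).mp hm)
      have hcont : D.contains s0 = false := by
        rw [Bool.eq_false_iff]
        intro hcon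
        rw [PySem.Dict.contains_iff_mem_keys, hkeys] at hcon
        exact hsS hcon
      have hget : D.getD s0 PySem.Dict.empty = PySem.Dict.empty :=
        PySem.Dict.getD_of_not_contains _ _ hcont
      rw [PySem.Set.add_of_not_mem hsS]
      show (D.insert s0 _).items = _
      rw [PySem.Dict.items_insert_of_not_contains _ _ hcont, ih, List.map_append]
      congr 1
      · refine List.map_congr_left (fun s hsmem => ?_)
        have hne : s0 ≠ s := fun he => hs (he ▸ (PySem.Set.mem_ofList _ _).mp hsmem)
        rw [pvInner_append_of_ne _ _ _ hne]
      · rw [hget]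
        have hinner : pvInner (ks ++ [(s0, n0)]) s0 = [(n0, 1)] := by
          unfold pvInner
          rw [pvNexts_append, if_pos rfl, pvNexts_nil_of_not_mem _ _ hs]
          simp [PySem.Set.ofList]
        simp only [List.map_cons, List.map_nil, hinner]
        apply congrArg (fun l => [l])
        refine congrArg (fun d => ((s0 : List Int), d)) ?_
        apply PySem.Dict.ext
        show ([] ++ [(n0, (0:Int) + 1)] : List (Int × Int)) = [(n0, 1)]
        norm_num

-- ===== VERDICT (by name: the statement is the Claim_ definition above) =====
theorem build_markov_chain_spec : Claim_equal_build_markov_chain := by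
  intro data k _ _
  show build_markov_chain data k = build_markov_chain_alt data k
  have hA : build_markov_chain data k
      = (((pvRng data k).map (pvPair data k)).foldl pvStepA PySem.Dict.empty).items.map
          (fun p => (p.1, p.2.items)) := by
    refine (congrArg (fun d : PySem.Dict (List Int) (PySem.Dict Int Int) =>
      d.items.map (fun p : List Int × PySem.Dict Int Int => (p.1, p.2.items))) ?_).symm
    rw [List.foldl_map]
    exact PySem.List.foldl_congr_mem _ _ _ _ (fun acc x _ => (pv_stepA_lit acc _ _).symm)
  have hB : build_markov_chain_alt data k
      = (PySem.Set.ofList (((pvRng data k).map (pvPair data k)).map (·.1))).map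
          (fun s => (s, pvInner ((pvRng data k).map (pvPair data k)) s)) := rfl
  rw [hA, hB, pv_char, List.map_map]
  rfl
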